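-- pv_equiv track=rewrite | github.com/19sProgrammersStudy/Byeongjun | Programmers_Lv2/210814_Programmers_lv2_[3차]n진수 게임.py | solution
-- ===== SOURCE A (Python) =====
-- from collections import deque
--
-- def solution(n, t, m, p):
--     answer = ''
--     lst=["0"]
--     now=1
--     while len(lst)< t*m :
--         temp=now
--         templi=deque()
--         while temp > 0 :
--             if temp%n <10 :
--                 templi.append(str(temp%n))
--             elif temp%n == 10 :
--                 templi.append("A")
--             elif temp%n == 11 :
--                 templi.append("B")
--             elif temp%n == 12 :
--                 templi.append("C")
--             elif temp%n == 13 :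
--                 templi.append("D")
--             elif temp%n == 14 :
--                 templi.append("E")
--             elif temp%n == 15 :
--                 templi.append("F")
--             temp//=n
--         while templi :
--             lst.append(templi.pop())
--         now+=1
--     idx=p-1
--     while len(answer)<t :
--         answer+=lst[idx]
--         idx+=m
--     return answer
-- ===== SOURCE B (Python) =====
-- def solution(n, t, m, p):
--     digs = "0123456789ABCDEF"
--
--     def champ(i):
--         # digit at position i of the base-n concatenation 0,1,2,...
--         if i < n:
--             return digs[i]
--         i -= n
--         d = 2
--         start = n
--         while True:
--             block = d * (n ** d - start)
--             if i < block:
--                 num = start + i // d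
--                 return digs[num // n ** (d - 1 - i % d) % n]
--             i -= block
--             start = n ** d
--             d += 1
--
--     return ''.join(champ(p - 1 + k * m) for k in range(t))
-- ===== Notes on version B (the rewrite author's own statement) =====
-- stated objective: alternative
-- what changed: Instead of materialising the whole base-n concatenation up to t*m digits and then striding over it, B locates each of the t required digits directly with the base-n digit-count (Champernowne) formula, never building the sequence; on bases outside 2..16 (excluded by Pre_) B's digit lookup raises, so a timing run could not credit the speed-up and it is left unclaimed.
-- outside the precondition, e.g. on solution(17, 2, 9, 9): A returns '80', B returns '81'; on solution(-3, 2, 2, 1): A returns '0-1', B returns 'EF'; on solution(2, 1, 3, 4): A returns '0', B returns '0'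
import Mathlib
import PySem

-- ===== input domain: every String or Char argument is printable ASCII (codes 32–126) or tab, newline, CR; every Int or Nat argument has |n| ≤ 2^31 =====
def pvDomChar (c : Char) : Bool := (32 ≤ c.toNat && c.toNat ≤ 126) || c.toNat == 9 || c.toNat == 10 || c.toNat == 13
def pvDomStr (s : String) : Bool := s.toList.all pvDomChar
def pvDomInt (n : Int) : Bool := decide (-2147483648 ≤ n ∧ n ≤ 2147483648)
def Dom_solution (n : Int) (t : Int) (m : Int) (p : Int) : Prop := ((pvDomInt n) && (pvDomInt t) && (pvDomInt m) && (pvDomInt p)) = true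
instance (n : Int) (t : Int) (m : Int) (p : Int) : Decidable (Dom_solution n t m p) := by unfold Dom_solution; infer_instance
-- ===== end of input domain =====

-- B replaces A's "materialise the first t*m digits of the base-n concatenation, then stride over the
-- list" by direct Champernowne-style digit extraction: each of the t needed digits is located with the
-- base-n digit-count formula (objective: alternative algorithm; return value only is compared).

-- ===== PORT A =====
-- the if/elif chain on temp%n (appends nothing when the remainder exceeds 15, as in A)
def aDigit (r : Int) : List (List Char) :=
  if r < 10 then [PySem.Int.toChars r]
  else if r = 10 then [['A']]
  else if r = 11 then [['B']]
  else if r = 12 then [['C']]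
  else if r = 13 then [['D']]
  else if r = 14 then [['E']]
  else if r = 15 then [['F']]
  else []

-- inner 'while temp > 0' loop: templi gets the digits of temp, least significant first
-- (fuel ≥ number of iterations; temp.toNat suffices on Pre_)
def aInner (n : Int) (temp : Int) (templi : List (List Char)) (fuel : Nat) : List (List Char) :=
  if 0 < temp then
    match fuel with
    | 0 => templi
    | f + 1 => aInner n (PySem.Int.floordiv temp n) (templi ++ aDigit (PySem.Int.mod temp n)) f
  else templi

-- outer 'while len(lst) < t*m' loop; 'while templi: lst.append(templi.pop())' = lst ++ templi.reverse
def aBuild (n : Int) (tm : Int) (lst : List (List Char)) (now : Int) (fuel : Nat) : List (List Char) :=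
  if (lst.length : Int) < tm then
    match fuel with
    | 0 => lst
    | f + 1 => aBuild n tm (lst ++ (aInner n now [] now.toNat).reverse) (now + 1) f
  else lst

-- final 'while len(answer) < t' loop (none from lst[idx] = IndexError, excluded by Pre_)
def aCollect (t : Int) (m : Int) (lst : List (List Char)) (answer : List Char) (idx : Int) (fuel : Nat) : List Char :=
  if (answer.length : Int) < t then
    match fuel with
    | 0 => answer
    | f + 1 =>
      match PySem.List.pyGet? lst idx with
      | none => answer
      | some s => aCollect t m lst (answer ++ s) (idx + m) f
  else answer

def solution (n : Int) (t : Int) (m : Int) (p : Int) : String :=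
  let lst := aBuild n (t * m) [['0']] 1 (t * m).toNat
  String.ofList (aCollect t m lst [] (p - 1) t.toNat)

-- ===== PORT B =====
def bDigs : List Char := ['0','1','2','3','4','5','6','7','8','9','A','B','C','D','E','F']

-- the 'while True' block-skipping loop of champ (i decreases by ≥ 1 each pass on Pre_, so fuel i+1 suffices;
-- n**d ported as n ^ d.toNat — exact since d ≥ 2 on every reachable call)
def bChampAux (n : Int) (i : Int) (d : Int) (start : Int) (fuel : Nat) : List Char :=
  match fuel with
  | 0 => []
  | f + 1 =>
    let block := d * (n ^ d.toNat - start)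
    if i < block then
      let num := start + PySem.Int.floordiv i d
      match PySem.List.pyGet? bDigs (PySem.Int.mod (PySem.Int.floordiv num (n ^ (d - 1 - PySem.Int.mod i d).toNat)) n) with
      | some c => [c]
      | none => []
    else bChampAux n (i - block) (d + 1) (n ^ d.toNat) f

-- champ(i): digit at position i of the concatenation of 0,1,2,… in base n
def bChamp (n : Int) (i : Int) : List Char :=
  if i < n then
    match PySem.List.pyGet? bDigs i with
    | some c => [c]
    | none => []
  else bChampAux n (i - n) 2 n (i.toNat + 1)

def solution_alt (n : Int) (t : Int) (m : Int) (p : Int) : String :=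
  String.ofList (PySem.Chars.join [] ((PySem.List.pyRange 0 t 1).map (fun k => bChamp n (p - 1 + k * m))))

-- ===== PRECONDITION & SPEC =====
-- Pre_ is the problem's natural domain (base 2..16, 1 ≤ p ≤ m), plus the trivial region t ≤ 0 where
-- A returns '' for any base. Outside it A diverges (n ≤ 1 with a positive t*m), silently skips digits
-- ≥ 16 or emits multi-character negative "digits" (n outside 2..16, an accident of the if/elif chain),
-- or wraps a negative index / raises IndexError (p outside 1..m).
def Pre_solution (n : Int) (t : Int) (m : Int) (p : Int) : Prop :=
  (2 ≤ n ∧ n ≤ 16 ∧ 1 ≤ p ∧ p ≤ m) ∨ (t ≤ 0 ∧ (0 ≤ m ∨ (2 ≤ n ∧ n ≤ 16)))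
instance (n : Int) (t : Int) (m : Int) (p : Int) : Decidable (Pre_solution n t m p) := by
  unfold Pre_solution; infer_instance

def pvWitness_solution : Int × Int × Int × Int := (2, 4, 2, 1)

def Spec_solution (n : Int) (t : Int) (m : Int) (p : Int) (out : String) : Prop := out = solution_alt n t m p
instance (n : Int) (t : Int) (m : Int) (p : Int) (out : String) : Decidable (Spec_solution n t m p out) := by unfold Spec_solution; infer_instance

-- ===== CLAIM (what is proved, stated in full; the proofs are below) =====
def Claim_equal_solution : Prop := ∀ (n : Int) (t : Int) (m : Int) (p : Int), Dom_solution n t m p → Pre_solution n t m p → Spec_solution n t m p (solution n t m p)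

-- ===== LEMMAS AND PROOFS =====

def digChar (r : Nat) : Char := bDigs.getD r '?'

def repC (N : Nat) (k : Nat) : List Char := ((Nat.digits N k).map digChar).reverse

def chunkC (N : Nat) (k : Nat) : List Char := if k = 0 then ['0'] else repC N k

theorem digits_getElem? (N : Nat) (hN : 2 ≤ N) :
    ∀ (i k : Nat), i < (Nat.digits N k).length →
      (Nat.digits N k)[i]? = some (k / N ^ i % N) := by
  intro i
  induction i with
  | zero =>
    intro k hk
    have hk0 : 0 < k := by
      by_contra h
      have : k = 0 := by omega
      simp [this] at hk
    rw [Nat.digits_def' (by omega : 1 < N) hk0]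
    simp
  | succ i ih =>
    intro k hk
    have hk0 : 0 < k := by
      by_contra h
      have : k = 0 := by omega
      simp [this] at hk
    rw [Nat.digits_def' (by omega : 1 < N) hk0] at hk ⊢
    simp only [List.getElem?_cons_succ]
    rw [ih (k / N) (by simpa using hk)]
    rw [Nat.div_div_eq_div_mul, pow_succ']

theorem digits_len_of (N d k : Nat) (hN : 2 ≤ N) (hd : 1 ≤ d)
    (h1 : N ^ (d - 1) ≤ k) (h2 : k < N ^ d) : (Nat.digits N k).length = d := by
  have hk0 : k ≠ 0 := by
    have : 0 < N ^ (d-1) := Nat.pow_pos (by omega : 0 < N)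
    omega
  rw [Nat.digits_len N k (by omega) hk0]
  have h2' : k < N ^ (d - 1 + 1) := by
    have : d - 1 + 1 = d := by omega
    rw [this]; exact h2
  have := Nat.log_eq_of_pow_le_of_lt_pow h1 h2'
  omega

theorem chunk_len (N d k : Nat) (hN : 2 ≤ N) (hd : 1 ≤ d)
    (h1 : N ^ (d - 1) ≤ k) (h2 : k < N ^ d) : (chunkC N k).length = d := by
  have hk0 : k ≠ 0 := by
    have : 0 < N ^ (d-1) := Nat.pow_pos (by omega : 0 < N)
    omega
  simp [chunkC, hk0, repC, digits_len_of N d k hN hd h1 h2]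

theorem chunk_getElem? (N d k j : Nat) (hN : 2 ≤ N) (hd : 1 ≤ d)
    (h1 : N ^ (d - 1) ≤ k) (h2 : k < N ^ d) (hj : j < d) :
    (chunkC N k)[j]? = some (digChar (k / N ^ (d - 1 - j) % N)) := by
  have hk0 : k ≠ 0 := by
    have : 0 < N ^ (d-1) := Nat.pow_pos (by omega : 0 < N)
    omega
  have hlen : (Nat.digits N k).length = d := digits_len_of N d k hN hd h1 h2
  simp only [chunkC, hk0, if_false, repC]
  rw [List.getElem?_reverse (by simp [hlen]; omega)]
  simp only [List.length_map, hlen]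
  rw [List.getElem?_map]
  rw [digits_getElem? N hN (d - 1 - j) k (by omega)]
  simp

theorem chunk_small (N k : Nat) (hN : 2 ≤ N) (hk : k < N) : chunkC N k = [digChar k] := by
  by_cases h0 : k = 0
  · subst h0; simp [chunkC]; decide
  · simp only [chunkC, h0, if_false, repC]
    rw [Nat.digits_def' (by omega : 1 < N) (by omega)]
    rw [Nat.mod_eq_of_lt hk, Nat.div_eq_of_lt hk]
    simp

theorem flatMap_const_len_length {α β : Type} (f : α → List β) (d : Nat) :
    ∀ (l : List α), (∀ x ∈ l, (f x).length = d) → (l.flatMap f).length = l.length * d := by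
  intro l
  induction l with
  | nil => simp
  | cons x xs ih =>
    intro h
    simp only [List.flatMap_cons, List.length_append, List.length_cons]
    rw [h x (by simp), ih (fun y hy => h y (by simp [hy]))]
    ring

theorem flatMap_const_len_getElem? {α β : Type} (f : α → List β) (d : Nat) :
    ∀ (l : List α) (i : Nat), (∀ x ∈ l, (f x).length = d) → i < l.length * d →
      (l.flatMap f)[i]? = l[i / d]?.bind (fun x => (f x)[i % d]?) := by
  intro l
  induction l with
  | nil => intro i h hi; simp at hi
  | cons x xs ih =>
    intro i h hi
    have hd0 : 0 < d := by
      rcases Nat.eq_zero_or_pos d with h0 | h0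
      · subst h0; simp at hi
      · exact h0
    have hfx := h x (List.mem_cons_self)
    have hxslen : (x :: xs).length * d = d + xs.length * d := by
      rw [List.length_cons, Nat.succ_mul]; omega
    rw [hxslen] at hi
    by_cases hcase : i < d
    · have hdiv : i / d = 0 := Nat.div_eq_of_lt hcase
      have hm : i % d = i := Nat.mod_eq_of_lt hcase
      simp only [List.flatMap_cons, hdiv, hm, List.getElem?_cons_zero, Option.bind_some]
      rw [List.getElem?_append_left (by rw [hfx]; exact hcase)]
    · have hi' : i - d < xs.length * d := by omega
      simp only [List.flatMap_cons]
      rw [List.getElem?_append_right (by omega)]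
      rw [hfx]
      rw [ih (i - d) (fun y hy => h y (by simp [hy])) hi']
      have h1 : i / d = (i - d) / d + 1 := by
        rw [Nat.div_eq_sub_div hd0 (by omega)]
      have h2 : i % d = (i - d) % d := by
        conv_lhs => rw [(by omega : i = (i - d) + d)]
        rw [Nat.add_mod_right]
      rw [h1, h2, List.getElem?_cons_succ]

theorem digChar_pyGet (v : Nat) (hv : v < 16) :
    PySem.List.pyGet? bDigs (v : Int) = some (digChar v) := by
  rw [PySem.List.pyGet?_natCast]
  interval_cases v <;> decide

-- indexing a flatMap of chunks over a fully d-digit segment of numbers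

theorem segment_getElem? (N d s c₀ i : Nat) (hN : 2 ≤ N) (hd : 1 ≤ d)
    (hs : N ^ (d-1) ≤ s) (hc : s + c₀ ≤ N ^ d) (hi : i < c₀ * d) :
    ((List.range' s c₀).flatMap (chunkC N))[i]? =
      some (digChar ((s + i / d) / N ^ (d - 1 - i % d) % N)) := by
  have hd0 : 0 < d := hd
  have hlen : ∀ x ∈ List.range' s c₀, (chunkC N x).length = d := by
    intro x hx
    rw [List.mem_range'_1] at hx
    exact chunk_len N d x hN hd (by omega) (by omega)
  rw [flatMap_const_len_getElem? (chunkC N) d (List.range' s c₀) i hlen (by simpa using hi)]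
  have hdiv : i / d < c₀ := (Nat.div_lt_iff_lt_mul hd0).mpr hi
  rw [List.getElem?_range' hdiv]
  simp only [Option.bind_some, one_mul]
  exact chunk_getElem? N d (s + i / d) (i % d) hN hd
    (le_trans hs (Nat.le_add_right s _))
    (lt_of_lt_of_le (Nat.add_lt_add_left hdiv s) hc) (Nat.mod_lt _ hd0)

theorem bChampAux_digit_branch (N : Nat) (hN2 : 2 ≤ N) (hN16 : N ≤ 16) (i d : Nat) :
    (let num := ((N ^ (d-1) : Nat) : Int) + PySem.Int.floordiv (i : Int) (d : Int);
     match PySem.List.pyGet? bDigs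
         (PySem.Int.mod (PySem.Int.floordiv num
           ((N : Int) ^ ((d : Int) - 1 - PySem.Int.mod (i : Int) (d : Int)).toNat)) (N : Int)) with
     | some c => [c]
     | none => []) = [digChar ((N ^ (d-1) + i / d) / N ^ (d - 1 - i % d) % N)] := by
  show (match PySem.List.pyGet? bDigs
         (PySem.Int.mod (PySem.Int.floordiv (((N ^ (d-1) : Nat) : Int) + PySem.Int.floordiv (i : Int) (d : Int))
           ((N : Int) ^ ((d : Int) - 1 - PySem.Int.mod (i : Int) (d : Int)).toNat)) (N : Int)) with
     | some c => [c]
     | none => []) = _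
  have h1 : ((N ^ (d-1) : Nat) : Int) + PySem.Int.floordiv (i : Int) (d : Int)
      = ((N ^ (d-1) + i / d : Nat) : Int) := by
    rw [PySem.Int.floordiv_natCast]; push_cast; ring
  have h2 : ((d : Int) - 1 - PySem.Int.mod (i : Int) (d : Int)).toNat = d - 1 - i % d := by
    rw [PySem.Int.mod_natCast]
    omega
  have h3 : (N : Int) ^ (d - 1 - i % d) = ((N ^ (d - 1 - i % d) : Nat) : Int) := by push_cast; ring
  rw [h1, h2, h3, PySem.Int.floordiv_natCast, PySem.Int.mod_natCast]
  rw [digChar_pyGet _ (lt_of_lt_of_le (Nat.mod_lt _ (by omega)) hN16)]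

theorem bChampAux_correct (N : Nat) (hN2 : 2 ≤ N) (hN16 : N ≤ 16) :
    ∀ (i d c fuel : Nat), 1 ≤ d → i < fuel →
      i < ((List.range' (N ^ (d-1)) c).flatMap (chunkC N)).length →
      bChampAux (N : Int) (i : Int) (d : Int) ((N ^ (d-1) : Nat) : Int) fuel
        = [((List.range' (N ^ (d-1)) c).flatMap (chunkC N)).getD i '?'] := by
  intro i
  induction i using Nat.strong_induction_on with
  | _ i IH =>
    intro d c fuel hd hfuel hiL
    have hpow : N ^ (d-1) < N ^ d := Nat.pow_lt_pow_right (by omega) (by omega)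
    obtain ⟨f, rfl⟩ : ∃ f, fuel = f + 1 := ⟨fuel - 1, by omega⟩
    have hchunklen : ∀ c', N ^ (d-1) + c' ≤ N ^ d →
        ((List.range' (N ^ (d-1)) c').flatMap (chunkC N)).length = c' * d := by
      intro c' hc'
      have h := flatMap_const_len_length (chunkC N) d (List.range' (N ^ (d-1)) c')
        (by intro x hx
            rw [List.mem_range'_1] at hx
            exact chunk_len N d x hN2 hd (by omega) (by omega))
      simpa using h
    rw [bChampAux]
    have hdt : ((d : Int)).toNat = d := Int.toNat_natCast d
    have hblock : (d : Int) * ((N : Int) ^ ((d : Int)).toNat - ((N ^ (d-1) : Nat) : Int))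
        = ((d * (N ^ d - N ^ (d-1)) : Nat) : Int) := by
      rw [hdt]; push_cast [Nat.cast_sub (le_of_lt hpow)]; ring
    rw [hblock]
    by_cases hlt : i < d * (N ^ d - N ^ (d-1))
    · rw [if_pos (by exact_mod_cast hlt)]
      -- the digit lies in the d-digit segment [N^(d-1), N^d)
      by_cases hcB : c ≤ N ^ d - N ^ (d-1)
      case pos =>
        have hiC : i < c * d := by
          rw [hchunklen c (by omega)] at hiL; exact hiL
        have hget := segment_getElem? N d (N ^ (d-1)) c i hN2 hd (le_refl _) (by omega) hiC
        rw [List.getD_eq_getElem?_getD, hget]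
        exact bChampAux_digit_branch N hN2 hN16 i d
      case neg =>
        have hiC : i < (N ^ d - N ^ (d-1)) * d := by rw [Nat.mul_comm]; exact hlt
        have hsplit : List.range' (N ^ (d-1)) c =
            List.range' (N ^ (d-1)) (N ^ d - N ^ (d-1)) ++
              List.range' (N ^ (d-1) + (N ^ d - N ^ (d-1))) (c - (N ^ d - N ^ (d-1))) := by
          rw [List.range'_append_1]; congr 1; omega
        have hget := segment_getElem? N d (N ^ (d-1)) (N ^ d - N ^ (d-1)) i hN2 hd
          (le_refl _) (by omega) hiC
        rw [List.getD_eq_getElem?_getD, hsplit, List.flatMap_append,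
          List.getElem?_append_left (by rw [hchunklen _ (by omega)]; exact hiC), hget]
        exact bChampAux_digit_branch N hN2 hN16 i d
    · rw [if_neg (by exact_mod_cast hlt)]
      -- skip the whole d-digit block and recurse with d+1
      have hcB : N ^ d - N ^ (d-1) < c := by
        by_contra hcb
        rw [hchunklen c (by omega)] at hiL
        have : c * d ≤ d * (N ^ d - N ^ (d-1)) := by
          rw [Nat.mul_comm]; exact Nat.mul_le_mul_left d (by omega)
        omega
      have hsplit : List.range' (N ^ (d-1)) c =
          List.range' (N ^ (d-1)) (N ^ d - N ^ (d-1)) ++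
            List.range' (N ^ d) (c - (N ^ d - N ^ (d-1))) := by
        have hap := List.range'_append_1 (s := N ^ (d-1)) (m := N ^ d - N ^ (d-1))
          (n := c - (N ^ d - N ^ (d-1)))
        rw [(by omega : N ^ (d-1) + (N ^ d - N ^ (d-1)) = N ^ d)] at hap
        rw [hap]
        congr 1
        omega
      have hk1 : 0 < d * (N ^ d - N ^ (d-1)) := Nat.mul_pos (by omega) (by omega)
      have harg1 : (i : Int) - ((d * (N ^ d - N ^ (d-1)) : Nat) : Int)
          = ((i - d * (N ^ d - N ^ (d-1)) : Nat) : Int) := by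
        push_cast [Nat.cast_sub (by omega : d * (N ^ d - N ^ (d-1)) ≤ i)]; ring
      have harg2 : (d : Int) + 1 = ((d + 1 : Nat) : Int) := by push_cast; ring
      have hbk : d * (N ^ d - N ^ (d-1)) = (N ^ d - N ^ (d-1)) * d := Nat.mul_comm _ _
      have hsimp : N ^ ((d+1) - 1) = N ^ d := by norm_num
      have harg3 : (N : Int) ^ ((d : Int)).toNat = ((N ^ d : Nat) : Int) := by
        rw [hdt]; push_cast; ring
      rw [harg1, harg2, harg3]
      rw [hsplit, List.flatMap_append, List.length_append, hchunklen _ (by omega)] at hiL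
      have hrec := IH (i - d * (N ^ d - N ^ (d-1))) (by omega) (d + 1)
        (c - (N ^ d - N ^ (d-1))) f (by omega) (by omega)
        (by rw [hsimp]; omega)
      rw [hsimp] at hrec
      rw [hrec]
      congr 1
      rw [hsplit, List.flatMap_append,
        List.getD_eq_getElem?_getD, List.getD_eq_getElem?_getD,
        List.getElem?_append_right (by rw [hchunklen _ (by omega)]; omega),
        hchunklen _ (by omega)]
      congr 2
      omega

def SLC (N : Nat) (M : Nat) : List Char := (List.range M).flatMap (chunkC N)

theorem small_flatMap (N K : Nat) (hK : K ≤ N) (hN : 2 ≤ N) :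
    (List.range K).flatMap (chunkC N) = (List.range K).map digChar := by
  induction K with
  | zero => simp
  | succ K ih =>
    rw [List.range_succ, List.flatMap_append, List.map_append, ih (by omega)]
    simp [chunk_small N K hN (by omega)]

theorem SLC_split (N M : Nat) (hN : 2 ≤ N) (hM : N ≤ M) :
    SLC N M = (List.range N).map digChar ++ (List.range' N (M - N)).flatMap (chunkC N) := by
  have hap := List.range'_append_1 (s := 0) (m := N) (n := M - N)
  simp only [Nat.zero_add] at hap
  rw [SLC, List.range_eq_range', ← (by rw [hap]; congr 1; omega :
    List.range' 0 N ++ List.range' N (M - N) = List.range' 0 M)]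
  rw [List.flatMap_append, ← List.range_eq_range', small_flatMap N N (le_refl N) hN]

theorem bChamp_correct (N : Nat) (hN2 : 2 ≤ N) (hN16 : N ≤ 16) (M i : Nat)
    (hi : i < (SLC N M).length) :
    bChamp (N : Int) (i : Int) = [(SLC N M).getD i '?'] := by
  rw [bChamp]
  by_cases hiN : i < N
  · rw [if_pos (by exact_mod_cast hiN)]
    rw [digChar_pyGet i (by omega)]
    by_cases hMN : M ≤ N
    · have hall : SLC N M = (List.range M).map digChar := small_flatMap N M hMN hN2
      rw [hall] at hi ⊢
      simp only [List.length_map, List.length_range] at hi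
      rw [List.getD_eq_getElem?_getD, List.getElem?_map, List.getElem?_range hi]
      rfl
    · rw [SLC_split N M hN2 (by omega), List.getD_eq_getElem?_getD,
        List.getElem?_append_left (by simpa using hiN), List.getElem?_map,
        List.getElem?_range hiN]
      rfl
  · rw [if_neg (by exact_mod_cast hiN)]
    have hMN : N < M := by
      by_contra hM
      have := small_flatMap N M (by omega) hN2
      rw [SLC, this] at hi
      simp only [List.length_map, List.length_range] at hi
      omega
    have hcast1 : (i : Int) - (N : Int) = ((i - N : Nat) : Int) := by omega
    have hcast2 : (2 : Int) = ((2 : Nat) : Int) := rfl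
    have hfuel : ((i : Int)).toNat + 1 = i + 1 := by omega
    rw [hcast1, hcast2, hfuel]
    rw [SLC_split N M hN2 (by omega)] at hi ⊢
    rw [List.length_append, List.length_map, List.length_range] at hi
    have hrec := bChampAux_correct N hN2 hN16 (i - N) 2 (M - N) (i + 1)
      (by omega) (by omega)
      (by rw [(show N ^ (2 - 1) = N from by norm_num)]; omega)
    rw [(show N ^ (2 - 1) = N from by norm_num)] at hrec
    rw [hrec]
    congr 1
    rw [List.getD_eq_getElem?_getD, List.getD_eq_getElem?_getD,
      List.getElem?_append_right (by simp; omega)]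
    congr 2
    simp

def toStrs (cs : List Char) : List (List Char) := cs.map (fun c => [c])

theorem aDigit_eq (n r : Int) (hn16 : n ≤ 16) (hr0 : 0 ≤ r) (hrn : r < n) :
    aDigit r = [[digChar r.toNat]] := by
  have hr16 : r < 16 := lt_of_lt_of_le hrn hn16
  interval_cases r <;> decide

theorem aInner_eq (n : Int) (hn2 : 2 ≤ n) (hn16 : n ≤ 16) :
    ∀ (fuel : Nat) (temp : Int) (templi : List (List Char)), 0 ≤ temp → temp.toNat ≤ fuel →
      aInner n temp templi fuel
        = templi ++ (Nat.digits n.toNat temp.toNat).map (fun r => [digChar r]) := by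
  intro fuel
  induction fuel with
  | zero =>
    intro temp templi h0 hf
    have : temp = 0 := by omega
    subst this
    rw [aInner, if_neg (by omega)]
    simp
  | succ f ih =>
    intro temp templi h0 hf
    by_cases hpos : 0 < temp
    · rw [aInner, if_pos hpos]
      have hmod : PySem.Int.mod temp n = ((temp.toNat % n.toNat : Nat) : Int) := by
        rw [PySem.Int.mod_eq_emod_of_pos (by omega)]
        push_cast
        rw [Int.toNat_of_nonneg h0, Int.toNat_of_nonneg (by omega : (0:Int) ≤ n)]
      have hdiv : PySem.Int.floordiv temp n = ((temp.toNat / n.toNat : Nat) : Int) := by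
        rw [PySem.Int.floordiv_eq_ediv_of_pos (by omega)]
        push_cast
        rw [Int.toNat_of_nonneg h0, Int.toNat_of_nonneg (by omega : (0:Int) ≤ n)]
      rw [hmod, aDigit_eq n _ hn16 (by omega)
        (by have := Nat.mod_lt temp.toNat (show 0 < n.toNat by omega); omega)]
      rw [hdiv, ih _ _ (Int.natCast_nonneg _) (by
        rw [Int.toNat_natCast]
        have := Nat.div_lt_self (show 0 < temp.toNat by omega) (show 1 < n.toNat by omega)
        omega)]
      rw [Int.toNat_natCast, Int.toNat_natCast]
      rw [Nat.digits_def' (show 1 < n.toNat by omega) (show 0 < temp.toNat by omega)]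
      simp
    · have : temp = 0 := by omega
      subst this
      rw [aInner, if_neg (by omega)]
      simp

theorem SLC_succ (N j : Nat) (hj : 1 ≤ j) :
    SLC N (j + 1) = SLC N j ++ repC N j := by
  have hj0 : j ≠ 0 := by omega
  rw [SLC, SLC, List.range_succ, List.flatMap_append]
  simp [chunkC, hj0]

theorem repC_ne_nil (N j : Nat) (hj : 1 ≤ j) : repC N j ≠ [] := by
  simp [repC, Nat.digits_ne_nil_iff_ne_zero]
  omega

theorem aBuild_eq (n : Int) (hn2 : 2 ≤ n) (hn16 : n ≤ 16) (tm : Int) :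
    ∀ (fuel : Nat) (j : Nat), 1 ≤ j → tm ≤ ((SLC n.toNat j).length : Int) + fuel →
      ∃ J : Nat, 1 ≤ J ∧
        aBuild n tm (toStrs (SLC n.toNat j)) (j : Int) fuel = toStrs (SLC n.toNat J) ∧
        tm ≤ ((SLC n.toNat J).length : Int) := by
  intro fuel
  induction fuel with
  | zero =>
    intro j hj hlen
    refine ⟨j, hj, ?_, by simpa using hlen⟩
    rw [aBuild, if_neg (by simp [toStrs]; omega)]
  | succ f ih =>
    intro j hj hlen
    by_cases hcond : ((toStrs (SLC n.toNat j)).length : Int) < tm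
    · rw [aBuild, if_pos hcond]
      have htoNat : ((j : Int)).toNat = j := Int.toNat_natCast j
      rw [htoNat, aInner_eq n hn2 hn16 j (j : Int) [] (by omega) (by omega)]
      rw [htoNat]
      have hrev : ([] ++ (Nat.digits n.toNat j).map (fun r => [digChar r])).reverse
          = toStrs (repC n.toNat j) := by
        simp [toStrs, repC, List.map_reverse]
      rw [hrev]
      have happ : toStrs (SLC n.toNat j) ++ toStrs (repC n.toNat j)
          = toStrs (SLC n.toNat (j + 1)) := by
        rw [SLC_succ n.toNat j hj, toStrs, toStrs, toStrs, List.map_append]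
      rw [happ, (by push_cast; ring : (j : Int) + 1 = ((j + 1 : Nat) : Int))]
      have hgrow : (SLC n.toNat j).length + 1 ≤ (SLC n.toNat (j + 1)).length := by
        rw [SLC_succ n.toNat j hj, List.length_append]
        have := repC_ne_nil n.toNat j hj
        have : 1 ≤ (repC n.toNat j).length := by
          rcases Nat.eq_zero_or_pos (repC n.toNat j).length with h | h
          · exact absurd (List.eq_nil_of_length_eq_zero h) this
          · exact h
        omega
      exact ih (j + 1) (by omega) (by omega)
    · rw [aBuild, if_neg hcond]
      refine ⟨j, hj, rfl, ?_⟩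
      simp only [toStrs, List.length_map] at hcond
      omega

theorem aCollect_eq (t mI : Int) (hm : 1 ≤ mI) (L : List Char) :
    ∀ (r : Nat) (fuel : Nat) (ans : List Char) (idx : Nat),
      (t - (ans.length : Int)).toNat = r → r ≤ fuel →
      (∀ k : Nat, k < r → idx + k * mI.toNat < L.length) →
      aCollect t mI (toStrs L) ans (idx : Int) fuel
        = ans ++ (List.range r).map (fun k => L.getD (idx + k * mI.toNat) '?') := by
  intro r
  induction r with
  | zero =>
    intro fuel ans idx hr hfuel hbound
    rw [aCollect.eq_def, if_neg (by omega)]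
    simp
  | succ r ih =>
    intro fuel ans idx hr hfuel hbound
    obtain ⟨f, rfl⟩ : ∃ f, fuel = f + 1 := ⟨fuel - 1, by omega⟩
    rw [aCollect, if_pos (by omega)]
    have hidx : idx < L.length := by
      have := hbound 0 (by omega)
      simpa using this
    have hget : PySem.List.pyGet? (toStrs L) ((idx : Nat) : Int) = some [L.getD idx '?'] := by
      rw [PySem.List.pyGet?_natCast]
      rw [toStrs, List.getElem?_map]
      rw [List.getElem?_eq_getElem hidx]
      rw [List.getD_eq_getElem?_getD, List.getElem?_eq_getElem hidx]
      rfl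
    have hcast : ((idx : Nat) : Int) + mI = ((idx + mI.toNat : Nat) : Int) := by
      push_cast [Int.toNat_of_nonneg (by omega : (0:Int) ≤ mI)]; ring
    simp only [hget]
    rw [hcast]
    rw [ih f (ans ++ [L.getD idx '?']) (idx + mI.toNat)
      (by simp; omega) (by omega)
      (by intro k hk
          have := hbound (k + 1) (by omega)
          have harith : idx + mI.toNat + k * mI.toNat = idx + (k + 1) * mI.toNat := by ring
          omega)]
    rw [List.append_assoc]
    congr 1
    rw [List.range_succ_eq_map]
    simp only [List.map_cons, List.map_map, List.singleton_append]
    congr 1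
    · simp
    · congr 1
      funext k
      simp only [Function.comp_apply]
      congr 1
      rw [Nat.succ_mul]
      omega

theorem SLC_one (N : Nat) : SLC N 1 = ['0'] := by
  simp [SLC, List.range_succ, chunkC]

theorem final_eq (n t m p : Int) (h2 : 2 ≤ n) (h16 : n ≤ 16) (hp : 1 ≤ p) (hpm : p ≤ m) :
    solution n t m p = solution_alt n t m p := by
  have hm1 : 1 ≤ m := le_trans hp hpm
  -- A side: build the list
  have hinit : ([['0']] : List (List Char)) = toStrs (SLC n.toNat 1) := by
    rw [SLC_one]; rfl
  obtain ⟨J, hJ1, hbuild, hJlen⟩ := aBuild_eq n h2 h16 (t * m) (t * m).toNat 1 (le_refl 1)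
    (by rw [SLC_one]; simp; omega)
  set L := SLC n.toNat J with hL
  -- the needed index bound
  have hbound : ∀ k : Nat, k < t.toNat → (p - 1).toNat + k * m.toNat < L.length := by
    intro k hk
    have ht1 : 1 ≤ t := by omega
    have hkm : (k : Int) * m ≤ (t - 1) * m := by
      apply mul_le_mul_of_nonneg_right _ (by omega)
      omega
    have hidx : (p - 1 : Int) + k * m < t * m := by nlinarith
    have hLlen : t * m ≤ (L.length : Int) := hJlen
    have hcast : ((p - 1).toNat + k * m.toNat : Int) = (p - 1) + k * m := by
      push_cast [Int.toNat_of_nonneg (by omega : (0:Int) ≤ p - 1),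
        Int.toNat_of_nonneg (by omega : (0:Int) ≤ m)]
      ring
    omega
  -- A side: collect
  have hcastp : (p - 1 : Int) = (((p - 1).toNat : Nat) : Int) := by omega
  rw [(by norm_num : ((1:Nat):Int) = (1:Int))] at hbuild
  have hA : solution n t m p
      = String.ofList ((List.range t.toNat).map (fun k => L.getD ((p - 1).toNat + k * m.toNat) '?')) := by
    rw [solution]
    rw [hinit, hbuild, hcastp]
    rw [aCollect_eq t m hm1 L t.toNat t.toNat [] (p-1).toNat (by simp) (le_refl _) hbound]
    simp
  -- B side
  have hB : solution_alt n t m p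
      = String.ofList ((List.range t.toNat).map (fun k => L.getD ((p - 1).toNat + k * m.toNat) '?')) := by
    rw [solution_alt]
    congr 1
    rw [PySem.List.pyRange_one]
    simp only [Int.sub_zero, List.map_map]
    have hmap : ∀ k ∈ List.range t.toNat,
        ((fun k => bChamp n (p - 1 + k * m)) ∘ (fun k : Nat => (0 : Int) + ↑k)) k
          = [L.getD ((p - 1).toNat + k * m.toNat) '?'] := by
      intro k hk
      rw [List.mem_range] at hk
      simp only [Function.comp_apply, Int.zero_add]
      have hcast : p - 1 + (k : Int) * m = (((p - 1).toNat + k * m.toNat : Nat) : Int) := by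
        push_cast [Int.toNat_of_nonneg (by omega : (0:Int) ≤ p - 1),
          Int.toNat_of_nonneg (by omega : (0:Int) ≤ m)]
        ring
      rw [hcast]
      have hnN : n = ((n.toNat : Nat) : Int) := by omega
      rw [hnN]
      exact bChamp_correct n.toNat (by omega) (by omega) J _ (hbound k hk)
    rw [List.map_congr_left hmap]
    have : (List.range t.toNat).map (fun k => [L.getD ((p - 1).toNat + k * m.toNat) '?'])
        = ((List.range t.toNat).map (fun k => L.getD ((p - 1).toNat + k * m.toNat) '?')).map (fun c => [c]) := by
      rw [List.map_map]
      rfl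
    rw [this]
    exact PySem.Chars.join_nil_singletons _
  rw [hA, hB]

-- ===== VERDICT (by name: the statement is the Claim_ definition above) =====
theorem trivial_eq (n t m p : Int) (ht : t ≤ 0) : solution n t m p = solution_alt n t m p := by
  rw [solution, solution_alt]
  rw [aCollect.eq_def, if_neg (by simp; omega)]
  rw [PySem.List.pyRange_one_eq_nil (by omega)]
  rfl

theorem solution_spec : Claim_equal_solution := by
  intro n t m p _ hpre
  show solution n t m p = solution_alt n t m p
  rcases hpre with ⟨h2, h16, hp, hpm⟩ | ⟨ht, _⟩
  · exact final_eq n t m p h2 h16 hp hpm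
  · exact trivial_eq n t m p ht
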